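-- pv_equiv track=rewrite | github.com/craigsimm/pixel-fix | src/pixel_fix/cli_workflow.py | _remap_selection_after_sort
-- ===== SOURCE A (Python) =====
-- def _remap_selection_after_sort(before: list[int], after: list[int], selection: list[int]) -> list[int]:
--     counts: dict[int, int] = {}
--     for index in selection:
--         if 0 <= index < len(before):
--             label = before[index]
--             counts[label] = counts.get(label, 0) + 1
--     remapped: list[int] = []
--     for index, label in enumerate(after):
--         remaining = counts.get(label, 0)
--         if remaining <= 0:
--             continue
--         remapped.append(index)
--         counts[label] = remaining - 1
--     return remapped
-- ===== SOURCE B (Python) =====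
-- def _remap_selection_after_sort(before: list[int], after: list[int], selection: list[int]) -> list[int]:
--     positions: dict[int, list[int]] = {}
--     for i, label in enumerate(after):
--         positions.setdefault(label, []).append(i)
--     needed: dict[int, int] = {}
--     for index in selection:
--         if 0 <= index < len(before):
--             label = before[index]
--             needed[label] = needed.get(label, 0) + 1
--     result: list[int] = []
--     for label, k in needed.items():
--         result.extend(positions.get(label, [])[:k])
--     return sorted(result)
-- ===== Notes on version B (the rewrite author's own statement) =====
-- stated objective: alternative
-- what changed: Replaces A's single streaming pass over `after` with a mutable decrement-counter by building a per-label index of positions once, taking the first k positions of each needed label via slicing, and sorting the collected indices.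
import Mathlib
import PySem

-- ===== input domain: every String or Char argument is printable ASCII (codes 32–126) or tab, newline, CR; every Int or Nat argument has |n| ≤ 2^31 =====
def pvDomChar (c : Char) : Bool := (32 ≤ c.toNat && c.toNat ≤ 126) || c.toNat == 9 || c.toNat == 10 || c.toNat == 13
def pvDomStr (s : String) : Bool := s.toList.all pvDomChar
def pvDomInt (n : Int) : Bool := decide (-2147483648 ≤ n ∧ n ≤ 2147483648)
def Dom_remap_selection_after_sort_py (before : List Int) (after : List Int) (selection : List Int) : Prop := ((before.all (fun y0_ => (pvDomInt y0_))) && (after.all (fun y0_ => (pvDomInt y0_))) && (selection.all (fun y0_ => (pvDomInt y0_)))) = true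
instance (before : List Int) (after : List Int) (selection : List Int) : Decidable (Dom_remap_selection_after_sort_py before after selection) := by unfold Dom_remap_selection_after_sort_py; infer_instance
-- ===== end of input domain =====

-- B replaces A's single streaming decrement-pass over `after` by an index of positions per
-- label, per-label slicing, and a final sort (objective: alternative decomposition, not faster).

-- ===== PORT A =====
-- one step of A's second loop: state = (counts dict, remapped list), element = (index, label)
def pvAStep (st : PySem.Dict Int Int × List Int) (p : Int × Int) : PySem.Dict Int Int × List Int :=
  let remaining := st.1.getD p.2 0
  if remaining ≤ 0 then st
  else (st.1.insert p.2 (remaining - 1), st.2 ++ [p.1])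

def remap_selection_after_sort_py (before : List Int) (after : List Int) (selection : List Int) : List Int :=
  let counts : PySem.Dict Int Int := selection.foldl
    (fun counts index =>
      if 0 ≤ index ∧ index < (before.length : Int) then
        counts.insert (PySem.List.pyGetD before index 0)
          (counts.getD (PySem.List.pyGetD before index 0) 0 + 1)
      else counts) PySem.Dict.empty
  ((PySem.List.enumerate after).foldl pvAStep (counts, [])).2

-- ===== PORT B =====
def remap_selection_after_sort_py_alt (before : List Int) (after : List Int) (selection : List Int) : List Int :=
  -- positions.setdefault(label, []).append(i)  ≡  positions[label] = positions.get(label, []) + [i]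
  let positions : PySem.Dict Int (List Int) := (PySem.List.enumerate after).foldl
    (fun d p => d.modify p.2 [] (fun xs => xs ++ [p.1])) PySem.Dict.empty
  let needed : PySem.Dict Int Int := selection.foldl
    (fun d index =>
      if 0 ≤ index ∧ index < (before.length : Int) then
        d.insert (PySem.List.pyGetD before index 0)
          (d.getD (PySem.List.pyGetD before index 0) 0 + 1)
      else d) PySem.Dict.empty
  let result : List Int := needed.items.foldl
    (fun acc p => acc ++ PySem.List.slice (positions.getD p.1 []) none (some p.2)) []
  PySem.List.sorted result (fun x => x) false

-- ===== PRECONDITION & SPEC =====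
def Spec_remap_selection_after_sort_py (before : List Int) (after : List Int) (selection : List Int) (out : List Int) : Prop := out = remap_selection_after_sort_py_alt before after selection
instance (before : List Int) (after : List Int) (selection : List Int) (out : List Int) : Decidable (Spec_remap_selection_after_sort_py before after selection out) := by unfold Spec_remap_selection_after_sort_py; infer_instance

-- ===== CLAIM (what is proved, stated in full; the proofs are below) =====
def Claim_equal_remap_selection_after_sort_py : Prop := ∀ (before : List Int) (after : List Int) (selection : List Int), Dom_remap_selection_after_sort_py before after selection → Spec_remap_selection_after_sort_py before after selection (remap_selection_after_sort_py before after selection)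

-- ===== LEMMAS AND PROOFS =====

-- the labels A counts: before[i] for each in-range i of selection, in order
def pvLabels (before : List Int) (selection : List Int) : List Int :=
  (selection.filter (fun i => decide (0 ≤ i ∧ i < (before.length : Int)))).map
    (fun i => PySem.List.pyGetD before i 0)

-- abstract form of A's second loop: r = remaining count per label
def pvSelGo : List (Int × Int) → (Int → Int) → List Int
  | [], _ => []
  | p :: ps, r =>
    if r p.2 ≤ 0 then pvSelGo ps r
    else p.1 :: pvSelGo ps (fun x => if x = p.2 then r p.2 - 1 else r x)

lemma pvAStep_loop (ps : List (Int × Int)) :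
    ∀ (d : PySem.Dict Int Int) (acc : List Int),
    (ps.foldl pvAStep (d, acc)).2 = acc ++ pvSelGo ps (fun l => d.getD l 0) := by
  induction ps with
  | nil => intro d acc; simp [pvSelGo]
  | cons p ps ih =>
    intro d acc
    by_cases h : d.getD p.2 0 ≤ 0
    · simp only [List.foldl_cons, pvAStep, if_pos h, pvSelGo]
      exact ih d acc
    · have hfun : (fun l => (d.insert p.2 (d.getD p.2 0 - 1)).getD l 0)
          = (fun x => if x = p.2 then d.getD p.2 0 - 1 else d.getD x 0) := by
        funext x
        by_cases hx : x = p.2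
        · subst hx; simp [PySem.Dict.getD_insert_self]
        · simp [hx, PySem.Dict.getD_insert_of_ne]
      simp only [List.foldl_cons, pvAStep, if_neg h, pvSelGo]
      rw [ih, hfun]
      simp

-- the counts/needed fold is Counter(pvLabels)
lemma pvCounts_eq (before : List Int) (selection : List Int) :
    selection.foldl
      (fun d index =>
        if 0 ≤ index ∧ index < (before.length : Int) then
          d.insert (PySem.List.pyGetD before index 0)
            (d.getD (PySem.List.pyGetD before index 0) 0 + 1)
        else d) PySem.Dict.empty
    = PySem.Dict.counter (pvLabels before selection) := by
  rw [PySem.List.foldl_ite_eq_foldl_filter, pvLabels,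
    ← PySem.Dict.foldl_insert_getD_add_one_eq_counter, List.foldl_map]

-- ascending positions of label l in the pair list
def pvIdx (l : Int) (ps : List (Int × Int)) : List Int :=
  (ps.filter (fun p => p.2 == l)).map (·.1)

lemma pvPositions_getD (after : List Int) (l : Int) :
    ((PySem.List.enumerate after).foldl
      (fun d p => d.modify p.2 [] (fun xs => xs ++ [p.1])) PySem.Dict.empty).getD l []
    = pvIdx l (PySem.List.enumerate after) := by
  have hE : ((PySem.List.enumerate after).map Prod.swap).foldl
      (fun d q => d.modify q.1 [] (fun xs => xs ++ [q.2])) PySem.Dict.empty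
      = (PySem.List.enumerate after).foldl
      (fun d p => d.modify p.2 [] (fun xs => xs ++ [p.1])) PySem.Dict.empty := by
    rw [List.foldl_map]
    rfl
  rw [← hE, PySem.Dict.getD_foldl_modify_append]
  simp [pvIdx, List.filter_map, Function.comp_def, PySem.Dict.getD_empty]

lemma pvFlatMapConsPerm : ∀ (keys : List Int) (l0 x : Int) (f g : Int → List Int),
    keys.Nodup → l0 ∈ keys → f l0 = x :: g l0 → (∀ l, l ≠ l0 → f l = g l) →
    (keys.flatMap f).Perm (x :: keys.flatMap g) := by
  intro keys
  induction keys with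
  | nil => intro l0 x f g _ hm; cases hm
  | cons k ks ih =>
    intro l0 x f g hnd hm hf hfg
    rcases List.nodup_cons.mp hnd with ⟨hk, hnd'⟩
    rcases List.mem_cons.mp hm with he | hm'
    · -- l0 = k
      subst he
      have hcongr : ks.flatMap f = ks.flatMap g := by
        apply List.flatMap_congr
        intro a ha
        exact hfg a (fun he => hk (he ▸ ha))
      simp only [List.flatMap_cons, hf, hcongr, List.cons_append]
      exact List.Perm.refl _
    · -- l0 ∈ ks
      have hne : k ≠ l0 := fun he => hk (he ▸ hm')
      simp only [List.flatMap_cons, hfg k hne]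
      exact (List.Perm.append_left (g k) (ih l0 x f g hnd' hm' hf hfg)).trans List.perm_middle

lemma pvPermMain : ∀ (ps : List (Int × Int)) (r : Int → Int) (keys : List Int),
    keys.Nodup → (∀ l, 0 < r l → l ∈ keys) →
    (keys.flatMap (fun l => (pvIdx l ps).take (r l).toNat)).Perm (pvSelGo ps r) := by
  intro ps
  induction ps with
  | nil =>
    intro r keys _ _
    simp [pvIdx, pvSelGo, List.flatMap]
  | cons p ps ih =>
    intro r keys hnd hinv
    by_cases h : r p.2 ≤ 0
    · have heq : keys.flatMap (fun l => (pvIdx l (p :: ps)).take (r l).toNat)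
          = keys.flatMap (fun l => (pvIdx l ps).take (r l).toNat) := by
        apply List.flatMap_congr
        intro l _
        by_cases hl : p.2 = l
        · subst hl
          have : (r p.2).toNat = 0 := Int.toNat_of_nonpos h
          simp [this]
        · have : (p.2 == l) = false := beq_false_of_ne hl
          simp [pvIdx, this]
      rw [heq]
      simp only [pvSelGo, if_pos h]
      exact ih r keys hnd hinv
    · replace h := not_le.mp h
      have hmem : p.2 ∈ keys := hinv p.2 h
      set r' : Int → Int := fun x => if x = p.2 then r p.2 - 1 else r x with hr'
      have hperm := pvFlatMapConsPerm keys p.2 p.1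
        (fun l => (pvIdx l (p :: ps)).take (r l).toNat)
        (fun l => (pvIdx l ps).take (r' l).toNat)
        hnd hmem ?_ ?_
      · have hinv' : ∀ l, 0 < r' l → l ∈ keys := by
          intro l hl
          by_cases he : l = p.2
          · exact he ▸ hmem
          · exact hinv l (by simpa [hr', he] using hl)
        have := (ih r' keys hnd hinv').cons p.1
        simp only [pvSelGo, if_neg (not_le.mpr h)]
        exact hperm.trans this
      · -- f p.2 = p.1 :: g p.2
        have hb : (p.2 == p.2) = true := beq_self_eq_true p.2
        have ht : (r p.2).toNat = (r' p.2).toNat + 1 := by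
          simp only [hr', if_pos rfl]
          omega
        simp [pvIdx, ht, List.take_succ_cons]
      · intro l hl
        have hb : (p.2 == l) = false := beq_false_of_ne (fun he => hl he.symm)
        simp [pvIdx, hb, hr', hl]

lemma pvSelGo_mem : ∀ (ps : List (Int × Int)) (r : Int → Int) (x : Int),
    x ∈ pvSelGo ps r → x ∈ ps.map (·.1) := by
  intro ps
  induction ps with
  | nil => intro r x hx; simp [pvSelGo] at hx
  | cons p ps ih =>
    intro r x hx
    simp only [pvSelGo] at hx
    split at hx
    · exact List.mem_cons_of_mem _ (ih _ _ hx)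
    · rcases List.mem_cons.mp hx with hx | hx
      · simp [hx]
      · exact List.mem_cons_of_mem _ (ih _ _ hx)

lemma pvSelGo_pairwise : ∀ (ps : List (Int × Int)) (r : Int → Int),
    ps.Pairwise (fun p q => p.1 < q.1) → (pvSelGo ps r).Pairwise (· < ·) := by
  intro ps
  induction ps with
  | nil => intro r _; simp [pvSelGo]
  | cons p ps ih =>
    intro r hp
    rcases List.pairwise_cons.mp hp with ⟨hhead, htail⟩
    simp only [pvSelGo]
    split
    · exact ih _ htail
    · refine List.pairwise_cons.mpr ⟨?_, ih _ htail⟩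
      intro y hy
      rcases List.mem_map.mp (pvSelGo_mem ps _ y hy) with ⟨q, hq, hqy⟩
      exact hqy ▸ hhead q hq

-- ===== VERDICT (by name: the statement is the Claim_ definition above) =====
theorem remap_selection_after_sort_py_spec : Claim_equal_remap_selection_after_sort_py := by
  intro before after selection _
  unfold Spec_remap_selection_after_sort_py
  unfold remap_selection_after_sort_py remap_selection_after_sort_py_alt
  rw [pvCounts_eq, pvAStep_loop]
  set labels := pvLabels before selection with hlab
  -- A's result is pvSelGo with remaining counts = Counter(labels)
  have hr : (fun l => (PySem.Dict.counter labels).getD l 0) = (fun l => (labels.count l : Int)) := by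
    funext l; exact PySem.Dict.getD_counter _ _
  rw [hr]
  dsimp only
  -- B's result list before sorting: per-label first-(count) positions, then sorted
  rw [PySem.Dict.items_counter, PySem.List.foldl_append_eq_flatMap, List.nil_append,
    List.flatMap_map]
  dsimp only
  simp only [pvPositions_getD, PySem.List.slice_to_natCast]
  have hperm := pvPermMain (PySem.List.enumerate after)
    (fun l => (labels.count l : Int)) (PySem.Set.ofList labels)
    (PySem.Set.nodup_ofList labels)
    (fun l hl => (PySem.Set.mem_ofList _ _).mpr (List.count_pos_iff.mp (by simpa using hl)))
  simp only [Int.toNat_natCast] at hperm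
  have hpw : (pvSelGo (PySem.List.enumerate after) (fun l => (labels.count l : Int))).Pairwise
      (fun a b => (fun x : Int => x) a < (fun x : Int => x) b) :=
    pvSelGo_pairwise _ _ (PySem.List.pairwise_lt_enumerate after 0)
  exact (PySem.List.sorted_eq_of_perm_of_pairwise_lt _ _ _ hperm.symm hpw).symm
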